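-- pv_equiv track=rewrite | github.com/ksomemo/Competitive-programming | atcoder/abc/116/D.py | editorial
-- ===== SOURCE A (Python) =====
-- from collections import defaultdict
--
-- def editorial(N, K, td):
--     td = sorted(td, key=lambda x: -x[1])
--     c = defaultdict(int)
--     d_sum = 0
--     # 種類数が増えないので、不要と判断して良い基礎ポイント
--     td_not_first = []
--     for t, d in td[:K]:
--         if c[t] > 0:
--             td_not_first.append(d)
--         c[t] += 1
--         d_sum += d
--
--     t_sum = len(c)
--     ans = d_sum + t_sum ** 2
--
--     for t, d in td[K:]:
--         # 更新の余地なし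
--         if not td_not_first:
--             return ans
--         # すでに存在するなら、基礎ポイント降順のため不要
--         if c[t] > 0:
--             continue
--
--         c[t] += 1
--         d_sum += -td_not_first.pop() + d
--         t_sum += 1
--         ans = max(ans, d_sum + t_sum ** 2)
--
--     return ans
-- ===== SOURCE B (Python) =====
-- def editorial(N, K, td):
--     s = sorted(td, key=lambda x: -x[1])
--     k = len(s[:K])  # number of sushi actually taken (same slicing as the problem statement)
--     firsts = []     # d of the first item of each type, in sorted order
--     dups = []       # d of every other item, in sorted order
--     seen = set()
--     for t, d in s:
--         if t in seen:
--             dups.append(d)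
--         else:
--             seen.add(t)
--             firsts.append(d)
--     F = [0]
--     for d in firsts:
--         F.append(F[-1] + d)
--     D = [0]
--     for d in dups:
--         D.append(D[-1] + d)
--     lo = max(0, k - len(dups))
--     hi = min(k, len(firsts))
--     return max(F[x] + D[k - x] + x * x for x in range(lo, hi + 1))
-- ===== Notes on version B (the rewrite author's own statement) =====
-- stated objective: alternative
-- what changed: A greedily simulates swaps: it scans the top-K with a counter dict collecting duplicate d's, then walks td[K:] popping the smallest duplicate for each new type with an early return; B never simulates swaps at all: it partitions the whole sorted list into first-occurrences and duplicates, builds two prefix-sum tables and returns the closed-form max of F[x]+D[k-x]+x^2 over every feasible distinct-type count x (including counts below the top-K's, proved dominated by sortedness).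
import Mathlib
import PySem

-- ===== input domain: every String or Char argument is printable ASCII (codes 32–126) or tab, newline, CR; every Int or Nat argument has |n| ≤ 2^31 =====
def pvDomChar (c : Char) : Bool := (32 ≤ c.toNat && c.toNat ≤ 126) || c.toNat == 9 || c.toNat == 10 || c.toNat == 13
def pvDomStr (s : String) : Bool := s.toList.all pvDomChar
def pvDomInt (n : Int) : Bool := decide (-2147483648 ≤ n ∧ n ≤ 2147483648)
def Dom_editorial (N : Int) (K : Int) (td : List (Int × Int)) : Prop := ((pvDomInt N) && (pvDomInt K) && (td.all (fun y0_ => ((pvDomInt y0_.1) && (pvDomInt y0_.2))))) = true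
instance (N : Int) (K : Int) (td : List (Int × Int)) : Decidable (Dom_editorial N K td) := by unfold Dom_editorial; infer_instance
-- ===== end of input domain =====

-- B replaces A's greedy swap simulation over the top-K prefix by a closed-form scan:
-- it partitions the whole sorted list into first-occurrences and duplicates, builds two
-- prefix-sum tables and maximises F[x] + D[k-x] + x^2 over every feasible distinct-type
-- count x (objective: alternative; same O(n log n) cost).

-- ===== PORT A =====
-- second loop of A, with the early 'return ans' when td_not_first is empty;
-- nf.pop() on a nonempty list is ported as getLastD/dropLast (exact: the branch guards nf ≠ [])
def editorialLoopA : List (Int × Int) → PySem.Dict Int Int → Int → List Int → Int → Int → Int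
  | [], _, _, _, _, ans => ans
  | (t, d) :: rest, c, dsum, nf, tsum, ans =>
    if nf = [] then ans
    else if 0 < c.getD t 0 then editorialLoopA rest c dsum nf tsum ans
    else
      let c' := c.insert t (c.getD t 0 + 1)
      let dsum' := dsum + (-(nf.getLastD 0) + d)
      let tsum' := tsum + 1
      editorialLoopA rest c' dsum' nf.dropLast tsum' (max ans (dsum' + tsum' ^ 2))

def editorial (N : Int) (K : Int) (td : List (Int × Int)) : Int :=
  let s := PySem.List.sorted td (fun x => -x.2) false
  let st := (PySem.List.slice s none (some K)).foldl
      (fun (st : PySem.Dict Int Int × Int × List Int) p =>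
        (st.1.insert p.1 (st.1.getD p.1 0 + 1), st.2.1 + p.2,
         if 0 < st.1.getD p.1 0 then st.2.2 ++ [p.2] else st.2.2))
      (PySem.Dict.empty, 0, [])
  let tsum : Int := (st.1.size : Int)
  let ans := st.2.1 + tsum ^ 2
  editorialLoopA (PySem.List.slice s (some K) none) st.1 st.2.1 st.2.2 tsum ans

-- ===== PORT B =====
def editorial_alt (N : Int) (K : Int) (td : List (Int × Int)) : Int :=
  let s := PySem.List.sorted td (fun x => -x.2) false
  let k : Int := ((PySem.List.slice s none (some K)).length : Int)
  let st := s.foldl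
      (fun (st : PySem.Set Int × List Int × List Int) p =>
        if st.1.contains p.1 then (st.1, st.2.1, st.2.2 ++ [p.2])
        else (PySem.Set.add st.1 p.1, st.2.1 ++ [p.2], st.2.2))
      (PySem.Set.empty, [], [])
  let firsts := st.2.1
  let dups := st.2.2
  let F := firsts.foldl (fun acc d => acc ++ [PySem.List.pyGetD acc (-1) 0 + d]) [0]
  let D := dups.foldl (fun acc d => acc ++ [PySem.List.pyGetD acc (-1) 0 + d]) [0]
  let lo : Int := max 0 (k - (dups.length : Int))
  let hi : Int := min k (firsts.length : Int)
  match PySem.List.max? ((PySem.List.pyRange lo (hi + 1) 1).map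
      (fun x => PySem.List.pyGetD F x 0 + PySem.List.pyGetD D (k - x) 0 + x * x)) (fun y => y) with
  | some m => m
  | none => 0    -- unreachable: the range is provably nonempty (Python's max never sees an empty iterable here)

-- ===== PRECONDITION & SPEC =====
def Spec_editorial (N : Int) (K : Int) (td : List (Int × Int)) (out : Int) : Prop := out = editorial_alt N K td
instance (N : Int) (K : Int) (td : List (Int × Int)) (out : Int) : Decidable (Spec_editorial N K td out) := by unfold Spec_editorial; infer_instance

-- ===== CLAIM (what is proved, stated in full; the proofs are below) =====
def Claim_equal_editorial : Prop := ∀ (N : Int) (K : Int) (td : List (Int × Int)), Dom_editorial N K td → Spec_editorial N K td (editorial N K td)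

-- ===== LEMMAS AND PROOFS =====

-- named fold bodies of the two ports
def stepA (st : PySem.Dict Int Int × Int × List Int) (p : Int × Int) : PySem.Dict Int Int × Int × List Int :=
  (st.1.insert p.1 (st.1.getD p.1 0 + 1), st.2.1 + p.2,
   if 0 < st.1.getD p.1 0 then st.2.2 ++ [p.2] else st.2.2)

def scanStep (st : PySem.Set Int × List Int × List Int) (p : Int × Int) : PySem.Set Int × List Int × List Int :=
  if st.1.contains p.1 then (st.1, st.2.1, st.2.2 ++ [p.2])
  else (PySem.Set.add st.1 p.1, st.2.1 ++ [p.2], st.2.2)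

def psStep (acc : List Int) (d : Int) : List Int := acc ++ [PySem.List.pyGetD acc (-1) 0 + d]

-- pure description of the first/duplicate partition
def seenAfter : List (Int × Int) → PySem.Set Int → PySem.Set Int
  | [], s => s
  | p :: l, s => if s.contains p.1 then seenAfter l s else seenAfter l (PySem.Set.add s p.1)

def partF : List (Int × Int) → PySem.Set Int → List Int
  | [], _ => []
  | p :: l, s => if s.contains p.1 then partF l s else p.2 :: partF l (PySem.Set.add s p.1)

def partD : List (Int × Int) → PySem.Set Int → List Int
  | [], _ => []
  | p :: l, s => if s.contains p.1 then p.2 :: partD l s else partD l (PySem.Set.add s p.1)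

-- prefix-sum tail
def tailPS (c : Int) : List Int → List Int
  | [] => []
  | d :: l => (c + d) :: tailPS (c + d) l

-- reference recursion for A's swap scan, and its value as a max over swap counts
def gRun : List Int → List Int → Int → Int → Int → Int
  | [], _, _, _, ans => ans
  | _ :: _, [], _, _, ans => ans
  | r :: rs, a :: as_, cur, tsum, ans =>
      gRun rs as_ (cur + (a - r)) (tsum + 1) (max ans ((cur + (a - r)) + (tsum + 1) ^ 2))

def bestFrom : List Int → List Int → Int → Int → Int
  | r0 :: rs, a0 :: as_, cur, tsum => max (cur + tsum ^ 2) (bestFrom rs as_ (cur + (a0 - r0)) (tsum + 1))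
  | _, _, cur, tsum => cur + tsum ^ 2

-- the dict/set relation maintained by the first loop
def PhInv (c : PySem.Dict Int Int) (seen : PySem.Set Int) : Prop :=
  (∀ t : Int, c.contains t = seen.contains t) ∧ (∀ t : Int, c.contains t = true → 0 < c.getD t 0) ∧
  (c.size : Int) = (seen.length : Int)

theorem set_contains_add (s : PySem.Set Int) (x u : Int) :
    (PySem.Set.add s x).contains u = (s.contains u || (u == x)) := by
  simp only [PySem.Set.add, PySem.Set.contains]
  by_cases h : x ∈ s <;> by_cases h2 : u = x <;> simp [h, h2]

theorem phinv_empty : PhInv PySem.Dict.empty PySem.Set.empty := by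
  refine ⟨fun t => ?_, fun t h => ?_, ?_⟩ <;>
    simp [PySem.Dict.contains_empty, PySem.Set.empty, PySem.Set.contains,
      PySem.Dict.size_empty] at *

theorem phinv_step (c : PySem.Dict Int Int) (seen : PySem.Set Int) (t : Int) (hInv : PhInv c seen) :
    PhInv (c.insert t (c.getD t 0 + 1)) (PySem.Set.add seen t) := by
  obtain ⟨h1, h2, h3⟩ := hInv
  refine ⟨fun u => ?_, fun u hu => ?_, ?_⟩
  · rw [PySem.Dict.contains_insert, set_contains_add, h1]
    exact Bool.or_comm _ _
  · rw [PySem.Dict.getD_insert]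
    split_ifs with hut
    · by_cases hc : c.contains t = true
      · have := h2 t hc; omega
      · rw [PySem.Dict.getD_of_not_contains c 0 (by simpa using hc)]
        omega
    · rw [PySem.Dict.contains_insert] at hu
      simp only [beq_iff_eq, Bool.or_eq_true] at hu
      exact h2 u (by tauto)
  · rw [PySem.Dict.size_insert, h1]
    simp only [PySem.Set.add, PySem.Set.contains, List.contains_eq_mem]
    by_cases hm : t ∈ seen
    · simp [hm, h3]
    · simp only [hm, decide_false, Bool.false_eq_true, if_false, List.length_append,
        List.length_cons, List.length_nil]
      push_cast
      omega

theorem phinv_step_old (c : PySem.Dict Int Int) (seen : PySem.Set Int) (t : Int)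
    (hInv : PhInv c seen) (hc : seen.contains t = true) :
    PhInv (c.insert t (c.getD t 0 + 1)) seen := by
  obtain ⟨h1, h2, h3⟩ := hInv
  refine ⟨fun u => ?_, fun u hu => ?_, ?_⟩
  · rw [PySem.Dict.contains_insert]
    by_cases hut : u = t
    · subst hut
      have hmem : u ∈ seen := by simpa [PySem.Set.contains] using hc
      simp [PySem.Set.contains, hmem]
    · simp [hut, h1]
  · rw [PySem.Dict.getD_insert]
    split_ifs with hut
    · have hp := h2 t (by rw [h1]; exact hc)
      omega
    · rw [PySem.Dict.contains_insert] at hu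
      simp only [beq_iff_eq, Bool.or_eq_true] at hu
      exact h2 u (by tauto)
  · rw [PySem.Dict.size_insert, h1, if_pos hc]; exact h3

-- B's single scan computes the partition
theorem scan_spec (l : List (Int × Int)) : ∀ (seen : PySem.Set Int) (f du : List Int),
    l.foldl scanStep (seen, f, du)
      = (seenAfter l seen, f ++ partF l seen, du ++ partD l seen) := by
  induction l with
  | nil => intro seen f du; simp [seenAfter, partF, partD]
  | cons p rest ih =>
    intro seen f du
    simp only [List.foldl_cons, scanStep, seenAfter, partF, partD]
    by_cases hc : seen.contains p.1 = true
    · simp only [hc, if_true]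
      rw [ih]
      simp
    · simp only [hc, Bool.false_eq_true, if_false]
      rw [ih]
      simp

-- A's first loop in terms of the partition
theorem phase1 (l : List (Int × Int)) :
    ∀ (c : PySem.Dict Int Int) (seen : PySem.Set Int) (dsum : Int) (nf : List Int),
    PhInv c seen →
    PhInv (l.foldl stepA (c, dsum, nf)).1 (seenAfter l seen) ∧
    (l.foldl stepA (c, dsum, nf)).2.1 = dsum + (l.map (·.2)).sum ∧
    (l.foldl stepA (c, dsum, nf)).2.2 = nf ++ partD l seen := by
  induction l with
  | nil =>
    intro c seen dsum nf h
    simpa [seenAfter, partD] using h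
  | cons p rest ih =>
    intro c seen dsum nf h
    have h1 := h.1
    have h2 := h.2.1
    simp only [List.foldl_cons, seenAfter, partD]
    by_cases hm : p.1 ∈ seen
    · have hc : seen.contains p.1 = true := by simp [PySem.Set.contains, hm]
      have hpos : 0 < c.getD p.1 0 := h2 p.1 (by rw [h1]; exact hc)
      have hA : stepA (c, dsum, nf) p
          = (c.insert p.1 (c.getD p.1 0 + 1), dsum + p.2, nf ++ [p.2]) := by
        simp [stepA, hpos]
      rw [hA, hc]
      simp only [if_true]
      obtain ⟨i1, i2, i3⟩ := ih _ seen _ _ (phinv_step_old c seen p.1 h hc)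
      refine ⟨i1, by rw [i2]; simp; ring, by rw [i3]; simp⟩
    · have hc : seen.contains p.1 = false := by simp [PySem.Set.contains, hm]
      have hnc : c.contains p.1 = false := by rw [h1]; exact hc
      have hz : c.getD p.1 0 = 0 := PySem.Dict.getD_of_not_contains c 0 hnc
      have hA : stepA (c, dsum, nf) p
          = (c.insert p.1 (c.getD p.1 0 + 1), dsum + p.2, nf) := by
        simp [stepA, hz]
      rw [hA, hc]
      simp only [Bool.false_eq_true, if_false]
      obtain ⟨i1, i2, i3⟩ := ih _ _ _ _ (phinv_step c seen p.1 h)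
      refine ⟨i1, by rw [i2]; simp; ring, i3⟩

-- A's second loop equals the reference recursion on the remaining firsts
theorem phase2 (rest : List (Int × Int)) :
    ∀ (c : PySem.Dict Int Int) (seen : PySem.Set Int) (dsum : Int) (nf : List Int)
      (tsum ans : Int), PhInv c seen →
    editorialLoopA rest c dsum nf tsum ans
      = gRun nf.reverse (partF rest seen) dsum tsum ans := by
  induction rest with
  | nil =>
    intro c seen dsum nf tsum ans _
    cases h : nf.reverse with
    | nil => simp [editorialLoopA, gRun]
    | cons r rs => simp [editorialLoopA, partF, gRun]
  | cons p rest ih =>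
    intro c seen dsum nf tsum ans hInv
    have h1 := hInv.1
    have h2 := hInv.2.1
    obtain ⟨t, d⟩ := p
    by_cases hnf : nf = []
    · subst hnf
      cases hp : partF ((t, d) :: rest) seen with
      | nil => simp [editorialLoopA, gRun]
      | cons a as_ => simp [editorialLoopA, gRun]
    · simp only [editorialLoopA, if_neg hnf]
      by_cases hmem : t ∈ seen
      · have hc : seen.contains t = true := by simp [PySem.Set.contains, hmem]
        have hpos : 0 < c.getD t 0 := h2 t (by rw [h1]; exact hc)
        rw [if_pos hpos]
        have heq : partF ((t, d) :: rest) seen = partF rest seen := by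
          simp only [partF]; rw [if_pos hc]
        rw [heq]
        exact ih c seen dsum nf tsum ans hInv
      · have hc : seen.contains t = false := by simp [PySem.Set.contains, hmem]
        have hnc : c.contains t = false := by rw [h1]; exact hc
        have hz : c.getD t 0 = 0 := PySem.Dict.getD_of_not_contains c 0 hnc
        have hzle : ¬ (0 < c.getD t 0) := by omega
        rw [if_neg hzle]
        have hpf : partF ((t, d) :: rest) seen
            = d :: partF rest (PySem.Set.add seen t) := by
          simp only [partF]; rw [if_neg (by rw [hc]; simp)]
        rw [hpf]
        have hrev : nf.reverse = nf.getLastD 0 :: nf.dropLast.reverse := by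
          conv_lhs => rw [← List.dropLast_append_getLast hnf]
          rw [List.reverse_append]
          simp [List.getLastD_eq_getLast?, List.getLast?_eq_some_getLast hnf]
        rw [hrev]
        simp only [gRun]
        rw [ih _ _ _ _ _ _ (phinv_step c seen t hInv)]
        have e1 : dsum + (-(nf.getLastD 0) + d) = dsum + (d - nf.getLastD 0) := by ring
        rw [e1]

-- partition bookkeeping
theorem part_length (l : List (Int × Int)) : ∀ s,
    (partF l s).length + (partD l s).length = l.length := by
  induction l with
  | nil => intro s; simp [partF, partD]
  | cons p rest ih =>
    intro s
    simp only [partF, partD]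
    by_cases hc : s.contains p.1 = true
    · rw [if_pos hc, if_pos hc]
      have := ih s
      simp only [List.length_cons]
      omega
    · rw [if_neg hc, if_neg hc]
      have := ih (PySem.Set.add s p.1)
      simp only [List.length_cons]
      omega

theorem part_sum (l : List (Int × Int)) : ∀ s,
    (partF l s).sum + (partD l s).sum = (l.map (·.2)).sum := by
  induction l with
  | nil => intro s; simp [partF, partD]
  | cons p rest ih =>
    intro s
    simp only [partF, partD, List.map_cons, List.sum_cons]
    by_cases hc : s.contains p.1 = true
    · rw [if_pos hc, if_pos hc]
      simp only [List.sum_cons]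
      rw [← ih s]
      ring
    · rw [if_neg hc, if_neg hc]
      simp only [List.sum_cons]
      rw [← ih (PySem.Set.add s p.1)]
      ring

theorem part_append (p : List (Int × Int)) : ∀ (q : List (Int × Int)) s,
    partF (p ++ q) s = partF p s ++ partF q (seenAfter p s) ∧
    partD (p ++ q) s = partD p s ++ partD q (seenAfter p s) := by
  induction p with
  | nil => intro q s; simp [partF, partD, seenAfter]
  | cons x rest ih =>
    intro q s
    simp only [List.cons_append, partF, partD, seenAfter]
    by_cases hc : s.contains x.1 = true
    · rw [if_pos hc, if_pos hc, if_pos hc, if_pos hc, if_pos hc]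
      exact ⟨(ih q s).1, by rw [(ih q s).2]; simp⟩
    · rw [if_neg hc, if_neg hc, if_neg hc, if_neg hc, if_neg hc]
      obtain ⟨e1, e2⟩ := ih q (PySem.Set.add s x.1)
      exact ⟨by rw [e1]; simp, by rw [e2]⟩

theorem seenAfter_length (l : List (Int × Int)) : ∀ s,
    (seenAfter l s).length = s.length + (partF l s).length := by
  induction l with
  | nil => intro s; simp [seenAfter, partF]
  | cons p rest ih =>
    intro s
    simp only [seenAfter, partF]
    by_cases hc : s.contains p.1 = true
    · rw [if_pos hc, if_pos hc]
      exact ih s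
    · rw [if_neg hc, if_neg hc]
      have hlen : (PySem.Set.add s p.1).length = s.length + 1 := by
        simp only [PySem.Set.add]
        rw [if_neg hc]
        simp
      rw [ih (PySem.Set.add s p.1), hlen]
      simp only [List.length_cons]
      omega

theorem mem_partF (l : List (Int × Int)) : ∀ s x, x ∈ partF l s → ∃ t, (t, x) ∈ l := by
  induction l with
  | nil => intro s x h; simp [partF] at h
  | cons p rest ih =>
    intro s x h
    simp only [partF] at h
    by_cases hc : s.contains p.1 = true
    · rw [if_pos hc] at h
      obtain ⟨t, ht⟩ := ih _ _ h
      exact ⟨t, List.mem_cons_of_mem _ ht⟩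
    · rw [if_neg hc] at h
      rcases List.mem_cons.mp h with h | h
      · exact ⟨p.1, by simp [h]⟩
      · obtain ⟨t, ht⟩ := ih _ _ h
        exact ⟨t, List.mem_cons_of_mem _ ht⟩

theorem mem_partD (l : List (Int × Int)) : ∀ s x, x ∈ partD l s → ∃ t, (t, x) ∈ l := by
  induction l with
  | nil => intro s x h; simp [partD] at h
  | cons p rest ih =>
    intro s x h
    simp only [partD] at h
    by_cases hc : s.contains p.1 = true
    · rw [if_pos hc] at h
      rcases List.mem_cons.mp h with h | h
      · exact ⟨p.1, by simp [h]⟩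
      · obtain ⟨t, ht⟩ := ih _ _ h
        exact ⟨t, List.mem_cons_of_mem _ ht⟩
    · rw [if_neg hc] at h
      obtain ⟨t, ht⟩ := ih _ _ h
      exact ⟨t, List.mem_cons_of_mem _ ht⟩

-- prefix-sum build facts
theorem foldl_psStep (l : List Int) : ∀ (acc : List Int), acc ≠ [] →
    l.foldl psStep acc = acc ++ tailPS (PySem.List.pyGetD acc (-1) 0) l := by
  induction l with
  | nil => intro acc h; simp [tailPS]
  | cons d rest ih =>
    intro acc h
    have hstep : psStep acc d = acc ++ [PySem.List.pyGetD acc (-1) 0 + d] := rfl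
    simp only [List.foldl_cons, hstep]
    rw [ih _ (by simp)]
    rw [PySem.List.pyGetD_neg_one_append_singleton]
    simp [tailPS]

theorem tailPS_getD (l : List Int) : ∀ (c : Int) (j : Nat), j ≤ l.length →
    (c :: tailPS c l).getD j 0 = c + (l.take j).sum := by
  induction l with
  | nil =>
    intro c j hj
    have hj0 : j = 0 := by simpa using hj
    subst hj0
    simp
  | cons d rest ih =>
    intro c j hj
    cases j with
    | zero => simp
    | succ j =>
      simp only [tailPS, List.getD_cons_succ]
      have := ih (c + d) j (by simpa using hj)
      rw [show ((c + d) :: tailPS (c + d) rest).getD j 0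
            = (c + d) + (rest.take j).sum from this]
      simp [List.take_succ_cons]
      ring

theorem ps_get (l : List Int) (x : Int) (h0 : 0 ≤ x) (h1 : x ≤ (l.length : Int)) :
    PySem.List.pyGetD (l.foldl psStep [0]) x 0 = (l.take x.toNat).sum := by
  have hb : l.foldl psStep [0] = 0 :: tailPS 0 l := by
    rw [foldl_psStep l [0] (by simp)]
    simp
    rfl
  rw [hb]
  have hx : x = ((x.toNat : Nat) : Int) := by omega
  rw [hx, PySem.List.pyGetD_natCast]
  rw [tailPS_getD l 0 x.toNat (by omega)]
  have hmax : max x 0 = x := by omega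
  simp only [Int.toNat_natCast, zero_add]

-- max-fold toolbox
theorem foldl_max_init (L : List Int) : ∀ (u v : Int),
    L.foldl max (max u v) = max u (L.foldl max v) := by
  induction L with
  | nil => intro u v; simp
  | cons a L ih =>
    intro u v
    simp only [List.foldl_cons]
    rw [max_assoc, ih]

theorem le_bestFrom (r a : List Int) (cur tsum : Int) :
    cur + tsum ^ 2 ≤ bestFrom r a cur tsum := by
  cases r with
  | nil => simp [bestFrom]
  | cons r0 rs =>
    cases a with
    | nil => simp [bestFrom]
    | cons a0 as_ => simp [bestFrom]

theorem gRun_eq_bestFrom (r : List Int) : ∀ (a : List Int) (cur tsum ans : Int),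
    cur + tsum ^ 2 ≤ ans →
    gRun r a cur tsum ans = max ans (bestFrom r a cur tsum) := by
  induction r with
  | nil =>
    intro a cur tsum ans h
    simp only [gRun, bestFrom]
    omega
  | cons r0 rs ih =>
    intro a cur tsum ans h
    cases a with
    | nil =>
      simp only [gRun, bestFrom]
      omega
    | cons a0 as_ =>
      simp only [gRun, bestFrom]
      rw [ih as_ (cur + (a0 - r0)) (tsum + 1) _ (le_max_right _ _)]
      have hle := le_bestFrom rs as_ (cur + (a0 - r0)) (tsum + 1)
      omega

theorem bestFrom_eq_fold (c : Int → Int) (r : List Int) : ∀ (a : List Int) (cur tsum : Int),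
    (∀ j : Nat, j ≤ min r.length a.length →
      c (tsum + j) = cur + ((a.take j).sum - (r.take j).sum) + (tsum + j) ^ 2) →
    bestFrom r a cur tsum
      = ((PySem.List.pyRange (tsum + 1) (tsum + (min r.length a.length : Nat) + 1) 1).map c).foldl
          max (c tsum) := by
  induction r with
  | nil =>
    intro a cur tsum hc
    have h0 := hc 0 (by simp)
    simp only [Nat.cast_zero, add_zero, List.take_zero, List.sum_nil, sub_zero] at h0
    simp only [bestFrom, List.length_nil, Nat.zero_min, Nat.cast_zero, add_zero]
    rw [PySem.List.pyRange_one_eq_nil (by omega)]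
    simp [h0]
  | cons r0 rs ih =>
    intro a cur tsum hc
    cases a with
    | nil =>
      have h0 := hc 0 (by simp)
      simp only [Nat.cast_zero, add_zero, List.take_zero, List.sum_nil, sub_zero] at h0
      simp only [bestFrom, List.length_nil, Nat.min_zero, Nat.cast_zero, add_zero]
      rw [PySem.List.pyRange_one_eq_nil (by omega)]
      simp [h0]
    | cons a0 as_ =>
      have h0 := hc 0 (by simp)
      simp only [Nat.cast_zero, add_zero, List.take_zero, List.sum_nil, sub_zero] at h0
      have h1 := hc 1 (by simp)
      have hc' : ∀ j : Nat, j ≤ min rs.length as_.length →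
          c (tsum + 1 + j) = (cur + (a0 - r0)) + ((as_.take j).sum - (rs.take j).sum)
            + (tsum + 1 + j) ^ 2 := by
        intro j hj
        have := hc (j + 1) (by simp only [List.length_cons]; omega)
        push_cast at this ⊢
        rw [show tsum + 1 + (j : Int) = tsum + ((j : Int) + 1) by ring]
        rw [this]
        simp [List.take_succ_cons]
        ring
      simp only [bestFrom]
      rw [ih as_ (cur + (a0 - r0)) (tsum + 1) hc']
      have hmin : (min (r0 :: rs).length (a0 :: as_).length : Nat)
          = (min rs.length as_.length : Nat) + 1 := by
        simp only [List.length_cons]; omega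
      rw [hmin]
      rw [PySem.List.pyRange_one_cons (a := tsum + 1)
        (by push_cast; omega)]
      simp only [List.map_cons, List.foldl_cons]
      rw [foldl_max_init]
      rw [h0]
      push_cast
      ring_nf

theorem chain_ext (c : Int → Int) (hi : Int) : ∀ (m : Nat) (x : Int),
    (∀ y, x ≤ y → y < x + m → c y ≤ c (y + 1)) → x + m ≤ hi →
    ((PySem.List.pyRange (x + 1) (hi + 1) 1).map c).foldl max (c x)
      = ((PySem.List.pyRange (x + m + 1) (hi + 1) 1).map c).foldl max (c (x + m)) := by
  intro m
  induction m with
  | zero => intro x _ _; simp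
  | succ m ih =>
    intro x hmono hle
    have hx1 : x + 1 ≤ hi := by push_cast at hle ⊢; omega
    rw [PySem.List.pyRange_one_cons (a := x + 1) (by omega)]
    simp only [List.map_cons, List.foldl_cons]
    have hstep : max (c x) (c (x + 1)) = c (x + 1) :=
      max_eq_right (hmono x le_rfl (by push_cast; omega))
    rw [hstep]
    have := ih (x + 1) (fun y hy1 hy2 => hmono y (by omega) (by push_cast at hy2 ⊢; omega))
      (by push_cast at hle ⊢; omega)
    rw [show x + 1 + (m : Int) + 1 = x + ((m : Int) + 1) + 1 by ring] at this
    rw [show x + 1 + (m : Int) = x + ((m : Int) + 1) by ring] at this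
    rw [this]
    push_cast
    ring_nf

-- sum of a reversed-take against the take of the complement
theorem sum_take_reverse (l : List Int) (j : Nat) (h : j ≤ l.length) :
    (l.reverse.take j).sum + (l.take (l.length - j)).sum = l.sum := by
  have hrev : l.reverse.take j = (l.drop (l.length - j)).reverse :=
    List.take_reverse
  rw [hrev, List.sum_reverse]
  conv_rhs => rw [← List.take_append_drop (l.length - j) l]
  rw [List.sum_append]
  ring


-- the heart of the equivalence, for a generic list s (already sorted) and prefix length m
theorem central (s : List (Int × Int)) (m : Nat) (hm : m ≤ s.length)
    (hsorted : List.Pairwise (fun a b : Int × Int => b.2 ≤ a.2) s) :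
    editorialLoopA (s.drop m) ((s.take m).foldl stepA (PySem.Dict.empty, 0, [])).1
        ((s.take m).foldl stepA (PySem.Dict.empty, 0, [])).2.1
        ((s.take m).foldl stepA (PySem.Dict.empty, 0, [])).2.2
        ((((s.take m).foldl stepA (PySem.Dict.empty, 0, [])).1.size : Int))
        (((s.take m).foldl stepA (PySem.Dict.empty, 0, [])).2.1
          + (((s.take m).foldl stepA (PySem.Dict.empty, 0, [])).1.size : Int) ^ 2)
      = (match PySem.List.max?
          ((PySem.List.pyRange
              (max 0 ((m : Int) - (((s.foldl scanStep (PySem.Set.empty, [], [])).2.2.length : Nat) : Int)))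
              (min (m : Int) ((((s.foldl scanStep (PySem.Set.empty, [], [])).2.1.length : Nat) : Int)) + 1) 1).map
            (fun x => PySem.List.pyGetD ((s.foldl scanStep (PySem.Set.empty, [], [])).2.1.foldl psStep [0]) x 0
              + PySem.List.pyGetD ((s.foldl scanStep (PySem.Set.empty, [], [])).2.2.foldl psStep [0]) ((m : Int) - x) 0
              + x * x)) (fun y => y) with
        | some v => v
        | none => 0) := by
  have hpq : s.take m ++ s.drop m = s := List.take_append_drop m s
  set p := s.take m with hp
  set q := s.drop m with hq
  set sp := seenAfter p PySem.Set.empty with hsp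
  set fk := partF p PySem.Set.empty with hfk
  set dk := partD p PySem.Set.empty with hdk
  set fr := partF q sp with hfr
  set dr := partD q sp with hdr
  set nf := fk.length with hnf
  set nd := dk.length with hnd
  set nfr := fr.length with hnfr
  set ndr := dr.length with hndr
  have hemptylen : (PySem.Set.empty : PySem.Set Int).length = 0 := rfl
  have hsplitF : partF s PySem.Set.empty = fk ++ fr := by
    rw [← hpq]; exact (part_append p q PySem.Set.empty).1
  have hsplitD : partD s PySem.Set.empty = dk ++ dr := by
    rw [← hpq]; exact (part_append p q PySem.Set.empty).2
  have hscan : s.foldl scanStep (PySem.Set.empty, [], [])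
      = (seenAfter s PySem.Set.empty, fk ++ fr, dk ++ dr) := by
    rw [scan_spec, hsplitF, hsplitD]; simp
  have hplen : p.length = m := by rw [hp]; exact List.length_take_of_le hm
  have hmn : nf + nd = m := by rw [hnf, hnd, hfk, hdk, part_length p PySem.Set.empty, hplen]
  have hslen : s.length = m + nfr + ndr := by
    have h1 := part_length q sp
    have h2 : q.length = s.length - m := by rw [hq]; simp
    rw [← hnfr, ← hndr] at h1
    omega
  -- A side
  obtain ⟨hInv, hsum, hnfval⟩ := phase1 p PySem.Dict.empty PySem.Set.empty 0 [] phinv_empty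
  set ra := p.foldl stepA (PySem.Dict.empty, 0, []) with hra
  set dsum := (p.map (·.2)).sum with hdsum
  have hsum' : ra.2.1 = dsum := by rw [hsum, zero_add]
  have hnf' : ra.2.2 = dk := by rw [hnfval, List.nil_append, hdk]
  have hsize : (ra.1.size : Int) = (nf : Int) := by
    rw [hInv.2.2, seenAfter_length p PySem.Set.empty, hemptylen, ← hfk, ← hnf]
    omega
  have hdsum2 : dsum = fk.sum + dk.sum := by
    rw [hdsum, ← part_sum p PySem.Set.empty]
  -- run A to bestFrom
  rw [hsum', hnf', hsize]
  rw [phase2 q ra.1 sp dsum dk (nf : Int) (dsum + (nf : Int) ^ 2) hInv]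
  rw [gRun_eq_bestFrom dk.reverse fr dsum (nf : Int) (dsum + (nf : Int) ^ 2) le_rfl]
  rw [max_eq_right (le_bestFrom dk.reverse fr dsum (nf : Int))]
  -- B side abbreviations
  rw [hscan]
  set F := (fk ++ fr).foldl psStep [0] with hF
  set D := (dk ++ dr).foldl psStep [0] with hD
  set c : Int → Int := fun x => PySem.List.pyGetD F x 0
      + PySem.List.pyGetD D ((m : Int) - x) 0 + x * x with hcdef
  set lo : Int := max 0 ((m : Int) - ((dk ++ dr).length : Int)) with hlo
  set hi : Int := min (m : Int) (((fk ++ fr).length : Int)) with hhi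
  have hlappF : ((fk ++ fr).length : Int) = (nf : Int) + (nfr : Int) := by simp [hnf, hnfr]
  have hlappD : ((dk ++ dr).length : Int) = (nd : Int) + (ndr : Int) := by simp [hnd, hndr]
  have hlot : lo ≤ (nf : Int) := by
    rw [hlo, hlappD]; push_cast; omega
  have hloz : 0 ≤ lo := by rw [hlo]; exact le_max_left _ _
  have hthi : (nf : Int) ≤ hi := by rw [hhi, hlappF]; push_cast; omega
  have hgetF : ∀ x : Int, 0 ≤ x → x ≤ (nf : Int) + (nfr : Int) →
      PySem.List.pyGetD F x 0 = ((fk ++ fr).take x.toNat).sum := by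
    intro x h0 h1
    rw [hF]; exact ps_get _ x h0 (by rw [hlappF]; exact h1)
  have hgetD : ∀ x : Int, 0 ≤ x → x ≤ (nd : Int) + (ndr : Int) →
      PySem.List.pyGetD D x 0 = ((dk ++ dr).take x.toNat).sum := by
    intro x h0 h1
    rw [hD]; exact ps_get _ x h0 (by rw [hlappD]; exact h1)
  -- value of c at nf + j
  have hc : ∀ j : Nat, j ≤ min dk.reverse.length fr.length →
      c ((nf : Int) + j) = dsum + ((fr.take j).sum - (dk.reverse.take j).sum)
        + ((nf : Int) + j) ^ 2 := by
    intro j hj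
    rw [List.length_reverse] at hj
    have hjd : j ≤ nd := le_trans hj (Nat.min_le_left _ _)
    have hjf : j ≤ nfr := le_trans hj (Nat.min_le_right _ _)
    rw [hcdef]
    simp only
    rw [hgetF ((nf : Int) + j) (by push_cast; omega) (by push_cast; omega)]
    rw [hgetD ((m : Int) - ((nf : Int) + j)) (by push_cast; omega) (by push_cast; omega)]
    have ht1 : ((nf : Int) + j).toNat = nf + j := by omega
    have ht2 : ((m : Int) - ((nf : Int) + j)).toNat = nd - j := by omega
    rw [ht1, ht2]
    rw [List.take_append, List.take_of_length_le (by omega),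
        show nf + j - fk.length = j by omega, List.sum_append]
    rw [List.take_append_of_le_length (by omega)]
    have hrev := sum_take_reverse dk j hjd
    rw [← hnd] at hrev
    rw [hdsum2]
    have : (dk.take (nd - j)).sum = dk.sum - (dk.reverse.take j).sum := by omega
    rw [this]
    ring
  -- monotone chain below nf
  have hmono : ∀ y, lo ≤ y → y < lo + (((nf : Int) - lo).toNat : Int) → c y ≤ c (y + 1) := by
    intro y hy1 hy2
    have hyt : y < (nf : Int) := by omega
    have hy0 : 0 ≤ y := le_trans hloz hy1
    have hylo : (m : Int) - ((nd : Int) + (ndr : Int)) ≤ y := by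
      have := le_trans (le_max_right 0 ((m : Int) - ((dk ++ dr).length : Int))) hy1
      rw [hlappD] at this
      omega
    have hidxF : y.toNat < nf := by omega
    have hidxD : ((m : Int) - y - 1).toNat < nd + ndr := by omega
    have hidxD2 : nd ≤ ((m : Int) - y - 1).toNat := by omega
    have happF : (fk ++ fr).length = nf + nfr := by simp [hnf, hnfr]
    have happD : (dk ++ dr).length = nd + ndr := by simp [hnd, hndr]
    have hvF : PySem.List.pyGetD F (y + 1) 0
        = PySem.List.pyGetD F y 0 + (fk ++ fr)[y.toNat]'(by rw [happF]; omega) := by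
      rw [hgetF y hy0 (by push_cast; omega), hgetF (y + 1) (by omega) (by push_cast; omega)]
      rw [show (y + 1).toNat = y.toNat + 1 by omega]
      exact List.sum_take_succ _ _ _
    have hvD : PySem.List.pyGetD D ((m : Int) - y) 0
        = PySem.List.pyGetD D ((m : Int) - (y + 1)) 0
          + (dk ++ dr)[((m : Int) - y - 1).toNat]'(by rw [happD]; omega) := by
      rw [hgetD ((m : Int) - y) (by omega) (by push_cast; omega),
          hgetD ((m : Int) - (y + 1)) (by omega) (by push_cast; omega)]
      rw [show ((m : Int) - y).toNat = ((m : Int) - y - 1).toNat + 1 by omega]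
      rw [show ((m : Int) - (y + 1)).toNat = ((m : Int) - y - 1).toNat by omega]
      exact List.sum_take_succ _ _ _
    -- the two elements compared
    have hFel : (fk ++ fr)[y.toNat]'(by rw [happF]; omega) ∈ fk := by
      rw [List.getElem_append_left hidxF]
      exact List.getElem_mem _
    have hDel : (dk ++ dr)[((m : Int) - y - 1).toNat]'(by rw [happD]; omega) ∈ dr := by
      rw [List.getElem_append_right hidxD2]
      exact List.getElem_mem _
    obtain ⟨t, htmem⟩ := mem_partF p PySem.Set.empty _ hFel
    obtain ⟨t', htmem'⟩ := mem_partD q sp _ hDel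
    have hPQ : ∀ u ∈ p, ∀ v ∈ q, v.2 ≤ u.2 := by
      have hs2 := hsorted
      rw [← hpq] at hs2
      exact fun u hu v hv => (List.pairwise_append.mp hs2).2.2 u hu v hv
    have hle : (dk ++ dr)[((m : Int) - y - 1).toNat]'(by rw [happD]; omega)
        ≤ (fk ++ fr)[y.toNat]'(by rw [happF]; omega) := hPQ (t, _) htmem (t', _) htmem'
    rw [hcdef]
    simp only
    rw [hvF, hvD]
    nlinarith [hle, hy0]
  -- evaluate B's match to a fold and walk the chain
  have hlohi : lo ≤ hi := le_trans hlot hthi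
  rw [PySem.List.pyRange_one_cons (by omega : lo < hi + 1)]
  rw [List.map_cons]
  rw [PySem.List.max?_id_cons]
  simp only
  have hchain := chain_ext c hi (((nf : Int) - lo).toNat) lo hmono
    (by rw [hlo, hhi, hlappD, hlappF]; push_cast; omega)
  rw [show lo + ((((nf : Int) - lo).toNat : Nat) : Int) = (nf : Int) by push_cast; omega] at hchain
  rw [hchain]
  rw [bestFrom_eq_fold c dk.reverse fr dsum (nf : Int) hc]
  congr 2
  · rw [hhi]
    simp only [List.length_reverse, List.length_append, ← hnf, ← hnd, ← hnfr]
    congr 1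
    push_cast
    omega


-- ===== VERDICT (by name: the statement is the Claim_ definition above) =====
theorem editorial_spec : Claim_equal_editorial := by
  intro N K td _
  show editorial N K td = editorial_alt N K td
  simp only [editorial, editorial_alt]
  have hfa : (fun (st : PySem.Dict Int Int × Int × List Int) (p : Int × Int) =>
      (st.1.insert p.1 (st.1.getD p.1 0 + 1), st.2.1 + p.2,
       if 0 < st.1.getD p.1 0 then st.2.2 ++ [p.2] else st.2.2)) = stepA := rfl
  have hfb : (fun (st : PySem.Set Int × List Int × List Int) (p : Int × Int) =>
      if st.1.contains p.1 then (st.1, st.2.1, st.2.2 ++ [p.2])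
      else (PySem.Set.add st.1 p.1, st.2.1 ++ [p.2], st.2.2)) = scanStep := rfl
  have hfp : (fun (acc : List Int) (d : Int) =>
      acc ++ [PySem.List.pyGetD acc (-1) 0 + d]) = psStep := rfl
  rw [hfa, hfb, hfp]
  set s := PySem.List.sorted td (fun x => -x.2) false with hs
  set m := PySem.List.clampIdx s.length K with hmdef
  have hm : m ≤ s.length := by
    rw [hmdef, PySem.List.clampIdx]
    split_ifs <;> omega
  have hs1 : PySem.List.slice s none (some K) = s.take m := by
    simp [PySem.List.slice, hmdef]
  have hs2 : PySem.List.slice s (some K) none = s.drop m := by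
    rw [PySem.List.slice_some_none, hmdef]
  have hklen : (((s.take m).length : Nat) : Int) = (m : Int) := by
    rw [List.length_take_of_le hm]
  rw [hs1, hs2, hklen]
  have hsorted : List.Pairwise (fun a b : Int × Int => b.2 ≤ a.2) s := by
    have := PySem.List.sorted_pairwise td (fun x : Int × Int => -x.2)
    rw [← hs] at this
    exact this.imp (fun h => by omega)
  exact central s m hm hsorted
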